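-- pv_equiv track=rewrite | github.com/nuonco/nuon | lib/obj/__init__.py | create_short_code
-- ===== SOURCE A (Python) =====
-- def create_short_code(offset):
--     '''create_short_code: create a friendly short code
--     '''
--     alphabet = '23456789abcdefghijkmnpqrstuvwxyzABCDEFGHJKLMNPQRSTUVWXYZ'
--     if offset == 0:
--         return alphabet[0]
--
--     arr = []
--     base = len(alphabet)
--     while offset:
--         offset, rem = divmod(offset, base)
--         arr.append(alphabet[rem])
--     arr.reverse()
--     return ''.join(arr)
-- ===== SOURCE B (Python) =====
-- def create_short_code(offset):
--     '''create_short_code: create a friendly short code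
--     '''
--     alphabet = '23456789abcdefghijkmnpqrstuvwxyzABCDEFGHJKLMNPQRSTUVWXYZ'
--     base = len(alphabet)
--     if offset == 0:
--         return alphabet[0]
--     # find the highest power of base not exceeding offset
--     p = 1
--     while p * base <= offset:
--         p *= base
--     # emit digits most-significant-first by dividing by shrinking powers
--     out = ''
--     while p > 0:
--         out += alphabet[offset // p]
--         offset %= p
--         p //= base
--     return out
-- ===== Notes on version B (the rewrite author's own statement) =====
-- stated objective: alternative
-- what changed: Replaced the append-then-reverse divmod loop with a power-scan: first find the highest power of the base not exceeding offset, then emit digits most-significant-first by dividing by shrinking powers, so no list, no reverse and no join.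
import Mathlib
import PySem

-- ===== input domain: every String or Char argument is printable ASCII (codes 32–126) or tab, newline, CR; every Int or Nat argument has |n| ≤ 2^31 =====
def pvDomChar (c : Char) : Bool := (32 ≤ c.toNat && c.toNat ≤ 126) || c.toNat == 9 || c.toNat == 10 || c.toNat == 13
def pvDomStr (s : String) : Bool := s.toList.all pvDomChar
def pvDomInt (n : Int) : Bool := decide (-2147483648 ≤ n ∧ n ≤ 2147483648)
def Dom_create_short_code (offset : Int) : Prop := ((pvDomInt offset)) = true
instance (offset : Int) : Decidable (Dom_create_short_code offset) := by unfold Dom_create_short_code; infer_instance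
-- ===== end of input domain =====

-- B replaces A's append-then-reverse divmod loop by a power-scan emitting digits most-significant-first.

-- ===== PORT A =====
def cscAlphabet : List Char := "23456789abcdefghijkmnpqrstuvwxyzABCDEFGHJKLMNPQRSTUVWXYZ".toList

-- the while loop of A: appends alphabet[offset % 56] and continues with offset // 56;
-- the 'offset < 0' branch is a totality guard only (Python loops forever there; excluded by Pre_)
def cscLoopA (offset : Int) (arr : List Char) : List Char :=
  if offset = 0 then arr
  else if _h : offset < 0 then arr
  else cscLoopA (PySem.Int.floordiv offset 56)
        (arr ++ [PySem.List.pyGetD cscAlphabet (PySem.Int.mod offset 56) ' '])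
termination_by offset.toNat
decreasing_by
  have h0 : 0 < offset := by omega
  have : PySem.Int.floordiv offset 56 = offset / 56 := PySem.Int.floordiv_eq_ediv_of_pos (by norm_num)
  omega

def create_short_code (offset : Int) : String :=
  if offset = 0 then String.ofList [PySem.List.pyGetD cscAlphabet 0 ' ']
  else String.ofList (cscLoopA offset []).reverse

-- ===== PORT B =====
-- B's first loop: grow p by factors of the base while p * base still fits under offset
-- (the '0 < p' conjunct is a totality guard only; the loop is entered with p = 1)
def cscFindP (p offset : Int) : Int :=
  if _h : 0 < p ∧ p * 56 ≤ offset then cscFindP (p * 56) offset else p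
termination_by (offset - p).toNat
decreasing_by omega

-- B's second loop: emit alphabet[offset // p], keep offset % p, shrink p by the base
def cscScanB (p offset : Int) : List Char :=
  if _h : 0 < p then
    PySem.List.pyGetD cscAlphabet (PySem.Int.floordiv offset p) ' '
      :: cscScanB (PySem.Int.floordiv p 56) (PySem.Int.mod offset p)
  else []
termination_by p.toNat
decreasing_by
  have : PySem.Int.floordiv p 56 = p / 56 := PySem.Int.floordiv_eq_ediv_of_pos (by norm_num)
  omega

def create_short_code_alt (offset : Int) : String :=
  if offset = 0 then String.ofList [PySem.List.pyGetD cscAlphabet 0 ' ']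
  else String.ofList (cscScanB (cscFindP 1 offset) offset)

-- ===== PRECONDITION & SPEC =====
-- A's while loop never terminates for negative offset (divmod floors, so offset stays nonzero), so Pre_ admits exactly the nonnegative inputs.
def Pre_create_short_code (offset : Int) : Prop := 0 ≤ offset
instance (offset : Int) : Decidable (Pre_create_short_code offset) := by unfold Pre_create_short_code; infer_instance
def pvWitness_create_short_code : Int := (123456)

def Spec_create_short_code (offset : Int) (out : String) : Prop := out = create_short_code_alt offset
instance (offset : Int) (out : String) : Decidable (Spec_create_short_code offset out) := by unfold Spec_create_short_code; infer_instance

-- ===== CLAIM (what is proved, stated in full; the proofs are below) =====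
def Claim_equal_create_short_code : Prop := ∀ (offset : Int), Dom_create_short_code offset → Pre_create_short_code offset → Spec_create_short_code offset (create_short_code offset)

-- ===== LEMMAS AND PROOFS =====

-- proof-side digit strings over Nat: rep = A's digit recurrence, fw = fixed-width (zero-padded)
def cscRep (n : Nat) : List Char :=
  if n = 0 then [] else cscRep (n / 56) ++ [cscAlphabet.getD (n % 56) ' ']
decreasing_by omega

def cscFW : Nat → Nat → List Char
  | 0, _ => []
  | d + 1, n => cscFW d (n / 56) ++ [cscAlphabet.getD (n % 56) ' ']

theorem cscLoopA_rep (k : Nat) : ∀ (n : Int), 0 ≤ n → n.toNat ≤ k →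
    ∀ arr : List Char, (cscLoopA n arr).reverse = cscRep n.toNat ++ arr.reverse := by
  induction k with
  | zero =>
    intro n hn hk arr
    have h0 : n = 0 := by omega
    subst h0
    simp [cscLoopA, cscRep]
  | succ k ih =>
    intro n hn hk arr
    by_cases h0 : n = 0
    · subst h0; simp [cscLoopA, cscRep]
    · have hpos : 0 < n := by omega
      have hq : PySem.Int.floordiv n 56 = n / 56 := PySem.Int.floordiv_eq_ediv_of_pos (by norm_num)
      have hm : PySem.Int.mod n 56 = n % 56 := PySem.Int.mod_eq_emod_of_pos (by norm_num)
      rw [cscLoopA]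
      simp only [h0, if_false]
      rw [dif_neg (by omega)]
      rw [ih _ (by omega) (by omega)]
      conv_rhs => rw [cscRep]
      rw [if_neg (show ¬ n.toNat = 0 by omega)]
      have hdiv : (PySem.Int.floordiv n 56).toNat = n.toNat / 56 := by rw [hq]; omega
      have hmodn : PySem.Int.mod n 56 = ((n.toNat % 56 : Nat) : Int) := by rw [hm]; omega
      rw [hdiv, hmodn, PySem.List.pyGetD_natCast]
      simp

-- bridging: the fixed-width string has head digit n / 56^k
theorem cscFW_msb (k : Nat) : ∀ n : Nat, n < 56 ^ (k + 1) →
    cscFW (k + 1) n = cscAlphabet.getD (n / 56 ^ k) ' ' :: cscFW k (n % 56 ^ k) := by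
  induction k with
  | zero =>
    intro n hn
    simp [cscFW, Nat.mod_eq_of_lt (by simpa using hn), Nat.div_one]
  | succ k ih =>
    intro n hn
    have hlt : n / 56 < 56 ^ (k + 1) := by
      rw [Nat.div_lt_iff_lt_mul (by norm_num)]
      calc n < 56 ^ (k + 2) := hn
        _ = 56 ^ (k + 1) * 56 := by ring
    have h1 : cscFW (k + 2) n = cscFW (k + 1) (n / 56) ++ [cscAlphabet.getD (n % 56) ' '] := rfl
    rw [h1, ih _ hlt]
    have e1 : n / 56 / 56 ^ k = n / 56 ^ (k + 1) := by
      rw [Nat.div_div_eq_div_mul]; ring_nf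
    have e2 : n / 56 % 56 ^ k = n % 56 ^ (k + 1) / 56 := by
      rw [show (56 : Nat) ^ (k + 1) = 56 * 56 ^ k by ring, Nat.mod_mul_right_div_self]
    have e3 : n % 56 ^ (k + 1) % 56 = n % 56 := by
      apply Nat.mod_mod_of_dvd
      exact dvd_pow_self 56 (Nat.succ_ne_zero k)
    rw [e1, e2]
    show _ = cscAlphabet.getD (n / 56 ^ (k + 1)) ' ' ::
      (cscFW k (n % 56 ^ (k + 1) / 56) ++ [cscAlphabet.getD (n % 56 ^ (k + 1) % 56) ' '])
    rw [e3]
    simp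

-- the power-scan loop computes the fixed-width digit string
theorem cscScanB_fw (k : Nat) : ∀ n : Nat, n < 56 ^ (k + 1) →
    cscScanB ((56 : Int) ^ k) (n : Int) = cscFW (k + 1) n := by
  induction k with
  | zero =>
    intro n hn
    rw [cscScanB]
    rw [dif_pos (by norm_num)]
    have h1 : PySem.Int.floordiv (n : Int) 1 = (n : Int) := by
      rw [PySem.Int.floordiv_eq_ediv_of_pos (by norm_num)]; simp
    have h2 : PySem.Int.floordiv (1 : Int) 56 = 0 := by decide
    have h3 : PySem.Int.mod (n : Int) 1 = 0 := by
      rw [PySem.Int.mod_eq_emod_of_pos (by norm_num)]; simp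
    rw [show ((56:Int)^0) = 1 by norm_num, h1, h2, h3, cscScanB, dif_neg (by norm_num)]
    have : n % 56 = n := Nat.mod_eq_of_lt (by simpa using hn)
    simp [cscFW, this]
  | succ k ih =>
    intro n hn
    have hppos : (0 : Int) < 56 ^ (k + 1) := by positivity
    rw [cscScanB, dif_pos hppos]
    have hcast : ((56 ^ (k + 1) : Nat) : Int) = (56 : Int) ^ (k + 1) := by push_cast; ring
    have hdiv : PySem.Int.floordiv (n : Int) (56 ^ (k + 1)) = ((n / 56 ^ (k + 1) : Nat) : Int) := by
      rw [PySem.Int.floordiv_eq_ediv_of_pos hppos, ← hcast, ← Int.natCast_div]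
    have hmod : PySem.Int.mod (n : Int) (56 ^ (k + 1)) = ((n % 56 ^ (k + 1) : Nat) : Int) := by
      rw [PySem.Int.mod_eq_emod_of_pos hppos, ← hcast, ← Int.natCast_mod]
    have hp : PySem.Int.floordiv ((56 : Int) ^ (k + 1)) 56 = (56 : Int) ^ k := by
      rw [PySem.Int.floordiv_eq_ediv_of_pos (by norm_num)]
      rw [show ((56:Int) ^ (k+1)) = 56 ^ k * 56 by ring]
      simp
    have hrec : n % 56 ^ (k + 1) < 56 ^ (k + 1) := Nat.mod_lt _ (by positivity)
    rw [hdiv, hmod, hp, ih _ hrec, cscFW_msb (k + 1) n hn, PySem.List.pyGetD_natCast]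

-- the digit recurrence equals the fixed-width string at the exact width
theorem cscRep_fw (k : Nat) : ∀ n : Nat, 56 ^ k ≤ n → n < 56 ^ (k + 1) →
    cscRep n = cscFW (k + 1) n := by
  induction k with
  | zero =>
    intro n h1 h2
    rw [cscRep, if_neg (by omega)]
    have : n / 56 = 0 := Nat.div_eq_of_lt (by simpa using h2)
    rw [this, cscRep]
    simp [cscFW]
  | succ k ih =>
    intro n h1 h2
    have hlo : 56 ^ k ≤ n / 56 := by
      rw [Nat.le_div_iff_mul_le (by norm_num)]
      calc 56 ^ k * 56 = 56 ^ (k + 1) := by ring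
        _ ≤ n := h1
    have hhi : n / 56 < 56 ^ (k + 1) := by
      rw [Nat.div_lt_iff_lt_mul (by norm_num)]
      calc n < 56 ^ (k + 2) := h2
        _ = 56 ^ (k + 1) * 56 := by ring
    have hn0 : ¬ n = 0 := by
      have : 0 < 56 ^ (k + 1) := by positivity
      omega
    rw [cscRep, if_neg hn0, ih _ hlo hhi]
    rfl

-- the first loop returns a power of the base bracketing offset
theorem cscFindP_spec (k : Nat) : ∀ p n : Int, 0 < p → p ≤ n → (n - p).toNat ≤ k →
    ∃ j : Nat, cscFindP p n = p * 56 ^ j ∧ p * 56 ^ j ≤ n ∧ n < p * 56 ^ (j + 1) := by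
  induction k with
  | zero =>
    intro p n hp hpn hk
    have hnp : n = p := by omega
    rw [cscFindP, dif_neg (by push Not; intro _; omega)]
    refine ⟨0, by simp, by simpa using hpn, ?_⟩
    rw [hnp, pow_one]
    omega
  | succ k ih =>
    intro p n hp hpn hk
    by_cases h : p * 56 ≤ n
    · rw [cscFindP, dif_pos ⟨hp, h⟩]
      obtain ⟨j, hj1, hj2, hj3⟩ := ih (p * 56) n (by positivity) h (by omega)
      exact ⟨j + 1, by rw [hj1]; ring, by calc p * 56 ^ (j+1) = p * 56 * 56 ^ j := by ring
                                           _ ≤ n := hj2,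
             by calc n < p * 56 * 56 ^ (j + 1) := hj3
                  _ = p * 56 ^ (j + 2) := by ring⟩
    · rw [cscFindP, dif_neg (by push Not; intro _; omega)]
      exact ⟨0, by simp, by simpa using hpn, by push_neg at h; simpa using h⟩

-- ===== VERDICT =====
theorem create_short_code_spec : Claim_equal_create_short_code := by
  intro n _ hpre
  have hp0 : (0 : Int) ≤ n := hpre
  unfold Spec_create_short_code create_short_code create_short_code_alt
  by_cases h0 : n = 0
  · simp [h0]
  · rw [if_neg h0, if_neg h0]
    have h1 : 1 ≤ n := by omega
    obtain ⟨j, hj1, hj2, hj3⟩ := cscFindP_spec n.toNat 1 n (by norm_num) h1 (by omega)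
    rw [one_mul] at hj1 hj2 hj3
    have hnn : n = ((n.toNat : Nat) : Int) := by omega
    have hc1 : ((56 ^ (j + 1) : Nat) : Int) = (56 : Int) ^ (j + 1) := by push_cast; ring
    have hc2 : ((56 ^ j : Nat) : Int) = (56 : Int) ^ j := by push_cast; ring
    have hlt : n.toNat < 56 ^ (j + 1) := by rw [← hc1] at hj3; omega
    have hle : 56 ^ j ≤ n.toNat := by rw [← hc2] at hj2; omega
    have hsc : cscScanB ((56 : Int) ^ j) n = cscFW (j + 1) n.toNat := by
      conv_lhs => rw [hnn]
      exact cscScanB_fw j n.toNat hlt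
    rw [hj1, hsc, cscLoopA_rep n.toNat n hp0 (le_refl _) [], ← cscRep_fw j n.toNat hle hlt]
    simp
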